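-- pv_equiv track=rewrite | github.com/amararora07/CodeFights | neighboringCells.py | neighboringCells
-- ===== SOURCE A (Python) =====
-- def neighboringCells(m):
--     for i in range(len(m)):
--         for j in range(len(m[0])):
--             c=0
--             if i-1>=0:
--                 c+=1
--             if i+1<len(m):
--                 c+=1
--             if j-1>=0:
--                 c+=1
--             if j+1<len(m[0]):
--                 c+=1
--             m[i][j]=c
--     return m
-- ===== SOURCE B (Python) =====
-- def neighboringCells(m):
--     rows = len(m)
--     if rows:
--         cols = len(m[0])
--         rc = [(i > 0) + (i < rows - 1) for i in range(rows)]
--         cc = [(j > 0) + (j < cols - 1) for j in range(cols)]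
--         for i, r in enumerate(m):
--             r[:cols] = [rc[i] + c for c in cc]
--     return m
-- ===== Notes on version B (the rewrite author's own statement) =====
-- stated objective: faster
-- what changed: B precomputes per-row and per-column neighbor-contribution tables (rc, cc) and rewrites each row in one slice assignment rc[i]+cc[j], instead of A's four per-cell boundary branches in a nested per-cell loop.
import Mathlib
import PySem

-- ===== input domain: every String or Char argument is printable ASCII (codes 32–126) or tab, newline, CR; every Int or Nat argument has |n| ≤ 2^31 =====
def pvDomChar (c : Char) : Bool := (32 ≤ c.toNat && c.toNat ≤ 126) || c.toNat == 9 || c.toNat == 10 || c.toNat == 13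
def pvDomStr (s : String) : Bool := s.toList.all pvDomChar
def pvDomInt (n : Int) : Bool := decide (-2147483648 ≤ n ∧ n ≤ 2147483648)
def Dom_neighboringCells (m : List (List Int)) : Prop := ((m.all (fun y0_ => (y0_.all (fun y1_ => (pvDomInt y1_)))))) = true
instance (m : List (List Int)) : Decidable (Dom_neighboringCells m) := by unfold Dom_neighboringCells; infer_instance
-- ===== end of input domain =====

-- B precomputes per-row/per-column contribution tables combined by addition instead of A's
-- four per-cell boundary branches; return-value equivalence (both Pythons also mutate m in place).

-- ===== PORT A =====
-- nested index loops; c built by four += branches; m[i][j] = c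
def neighboringCells (m : List (List Int)) : List (List Int) :=
  (List.range m.length).foldl (fun acc i =>
    (List.range (m.headD []).length).foldl (fun acc2 j =>
      let c : Int :=
        (((0 + (if 1 ≤ i then 1 else 0))
            + (if i + 1 < m.length then 1 else 0))
            + (if 1 ≤ j then 1 else 0))
            + (if j + 1 < (m.headD []).length then 1 else 0)
      acc2.modify i (fun row => row.set j c)) acc) m

-- ===== PORT B =====
-- rc/cc tables, then each row rewritten by one slice assignment r[:cols] = [rc[i]+c for c in cc]
def neighboringCells_alt (m : List (List Int)) : List (List Int) :=
  let rows := m.length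
  if rows = 0 then m
  else
    let cols := (m.headD []).length
    let rc : List Int := (List.range rows).map (fun i =>
      (if 0 < i then 1 else 0) + (if i < rows - 1 then 1 else 0))
    let cc : List Int := (List.range cols).map (fun j =>
      (if 0 < j then 1 else 0) + (if j < cols - 1 then 1 else 0))
    m.mapIdx (fun i r => cc.map (fun c => rc.getD i 0 + c) ++ r.drop cols)

-- ===== PRECONDITION & SPEC =====
-- Pre_ excludes ragged grids with a row shorter than the first row: there A raises IndexError.
def Pre_neighboringCells (m : List (List Int)) : Prop :=
  ∀ row ∈ m, (m.headD []).length ≤ row.length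
instance (m : List (List Int)) : Decidable (Pre_neighboringCells m) := by
  unfold Pre_neighboringCells; infer_instance
def pvWitness_neighboringCells : List (List Int) := [[0, 0, 0], [7, -1, 2]]

def Spec_neighboringCells (m : List (List Int)) (out : List (List Int)) : Prop := out = neighboringCells_alt m
instance (m : List (List Int)) (out : List (List Int)) : Decidable (Spec_neighboringCells m out) := by unfold Spec_neighboringCells; infer_instance

-- ===== CLAIM (what is proved, stated in full; the proofs are below) =====
def Claim_equal_neighboringCells : Prop := ∀ (m : List (List Int)), Dom_neighboringCells m → Pre_neighboringCells m → Spec_neighboringCells m (neighboringCells m)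

-- ===== LEMMAS AND PROOFS =====

-- two modify's at the same index fuse
theorem pv_modify_modify {α : Type} (l : List α) (i : Nat) (f g : α → α) :
    (l.modify i f).modify i g = l.modify i (fun x => g (f x)) := by
  apply List.ext_getElem
  · simp
  · intro j h1 h2
    simp only [List.length_modify] at h1 h2
    simp only [List.getElem_modify]
    split <;> simp

-- the inner loop over j only ever touches row i, so it commutes out of the matrix
theorem pv_foldl_modify_comm {α : Type} (n i : Nat) (t : Nat → α → α) (acc : List α) :
    (List.range n).foldl (fun a j => a.modify i (t j)) acc
      = acc.modify i (fun row => (List.range n).foldl (fun r j => t j r) row) := by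
  induction n generalizing acc with
  | zero =>
    apply List.ext_getElem
    · simp
    · intro j h1 h2
      simp only [List.length_modify] at h2
      simp [List.getElem_modify]
  | succ k ih =>
    simp only [List.range_succ, List.foldl_append, List.foldl_cons, List.foldl_nil, ih,
      pv_modify_modify]

-- filling positions 0..n-1 of a sufficiently long row by set equals map ++ drop
theorem pv_foldl_set (g : Nat → Int) (n : Nat) (row : List Int) (h : n ≤ row.length) :
    (List.range n).foldl (fun r j => r.set j (g j)) row
      = (List.range n).map g ++ row.drop n := by
  induction n with
  | zero => simp
  | succ k ih =>
    have hk : k ≤ row.length := Nat.le_of_succ_le h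
    have hlt : k < row.length := h
    simp only [List.range_succ, List.foldl_append, List.foldl_cons, List.foldl_nil, ih hk,
      List.map_append, List.map_cons, List.map_nil]
    have hdrop : row.drop k = row[k] :: row.drop (k + 1) :=
      (List.drop_eq_getElem_cons hlt)
    rw [List.set_append_right _ _ (by simp)]
    simp only [List.length_map, List.length_range, Nat.sub_self]
    rw [hdrop, List.set_cons_zero]
    simp

-- ascending modifies over all indices equal mapIdx (generalized to a prefix of indices)
theorem pv_foldl_modify_prefix {α : Type} (F : Nat → α → α) (L : List α) (k : Nat) :
    (List.range k).foldl (fun acc i => acc.modify i (F i)) L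
      = L.mapIdx (fun i r => if i < k then F i r else r) := by
  induction k with
  | zero =>
    apply List.ext_getElem
    · simp
    · intro j h1 h2
      simp
  | succ n ih =>
    simp only [List.range_succ, List.foldl_append, List.foldl_cons, List.foldl_nil, ih]
    apply List.ext_getElem
    · simp
    · intro j h1 h2
      simp only [List.length_modify, List.length_mapIdx] at h1 h2
      rw [List.getElem_modify]
      simp only [List.getElem_mapIdx]
      rcases Nat.lt_trichotomy j n with h | h | h
      · simp [Nat.ne_of_gt h, h, Nat.lt_succ_of_lt h]
      · subst h; simp
      · simp [Nat.ne_of_lt h, Nat.lt_succ_iff, Nat.not_lt.mpr (Nat.le_of_lt h),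
          Nat.not_le.mpr h]

theorem pv_foldl_modify_all {α : Type} (F : Nat → α → α) (L : List α) :
    (List.range L.length).foldl (fun acc i => acc.modify i (F i)) L = L.mapIdx F := by
  rw [pv_foldl_modify_prefix]
  apply List.ext_getElem
  · simp
  · intro j h1 h2
    simp only [List.length_mapIdx] at h1 h2
    simp [List.getElem_mapIdx, h1]

-- ===== VERDICT (by name: the statement is the Claim_ definition above) =====
theorem neighboringCells_spec : Claim_equal_neighboringCells := by
  intro m _ hpre
  unfold Spec_neighboringCells neighboringCells neighboringCells_alt
  rcases m with _ | ⟨r0, rest⟩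
  · simp
  · set m := r0 :: rest with hm
    have hne : m.length ≠ 0 := by simp [hm]
    simp only [hne, if_false]
    set cols := (m.headD []).length with hcols
    -- rewrite A: pull the inner loop through the matrix, then mapIdx
    have hA :
        (List.range m.length).foldl (fun acc i =>
          (List.range cols).foldl (fun acc2 j =>
            acc2.modify i (fun row => row.set j
              ((((0 + (if 1 ≤ i then 1 else 0))
                  + (if i + 1 < m.length then 1 else 0))
                  + (if 1 ≤ j then 1 else 0))
                  + (if j + 1 < cols then (1:Int) else 0)))) acc) m
          = m.mapIdx (fun i row =>
              (List.range cols).foldl (fun r j => r.set j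
                ((((0 + (if 1 ≤ i then 1 else 0))
                    + (if i + 1 < m.length then 1 else 0))
                    + (if 1 ≤ j then 1 else 0))
                    + (if j + 1 < cols then (1:Int) else 0))) row) := by
      rw [← pv_foldl_modify_all
        (fun i row => (List.range cols).foldl (fun r j => r.set j
          ((((0 + (if 1 ≤ i then 1 else 0))
              + (if i + 1 < m.length then 1 else 0))
              + (if 1 ≤ j then 1 else 0))
              + (if j + 1 < cols then (1:Int) else 0))) row) m]
      have hfun : (fun (acc : List (List Int)) i =>
          (List.range cols).foldl (fun acc2 j =>
            acc2.modify i (fun row => row.set j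
              ((((0 + (if 1 ≤ i then 1 else 0))
                  + (if i + 1 < m.length then 1 else 0))
                  + (if 1 ≤ j then 1 else 0))
                  + (if j + 1 < cols then (1:Int) else 0)))) acc)
          = (fun acc i => acc.modify i (fun row =>
              (List.range cols).foldl (fun r j => r.set j
                ((((0 + (if 1 ≤ i then 1 else 0))
                    + (if i + 1 < m.length then 1 else 0))
                    + (if 1 ≤ j then 1 else 0))
                    + (if j + 1 < cols then (1:Int) else 0))) row)) := by
        funext acc i
        exact pv_foldl_modify_comm cols i _ acc
      rw [hfun]
    rw [hA]
    -- now both sides are mapIdx over m; compare rows pointwise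
    apply List.ext_getElem
    · simp
    · intro i h1 h2
      simp only [List.length_mapIdx] at h1 h2
      simp only [List.getElem_mapIdx]
      have hrow : cols ≤ m[i].length := hpre _ (List.getElem_mem h1)
      rw [pv_foldl_set _ _ _ hrow]
      congr 1
      -- map over range cols on both sides
      rw [List.map_map]
      apply List.map_congr_left
      intro j hj
      have hjc : j < cols := List.mem_range.mp hj
      have hrc : ((List.range m.length).map (fun i =>
          (if 0 < i then (1:Int) else 0) + (if i < m.length - 1 then 1 else 0))).getD i 0
          = (if 0 < i then (1:Int) else 0) + (if i < m.length - 1 then 1 else 0) := by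
        rw [List.getD_eq_getElem _ _ (by simpa using h1)]
        simp
      simp only [Function.comp, hrc]
      split_ifs <;> omega
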